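-- pv_equiv track=rewrite | github.com/YacineCC/UNI | L1/Semestre_2/MPI/TP3/ex.py | TrianglePascalVierge
-- ===== SOURCE A (Python) =====
-- def Triangle(n):
-- 	tab = []
-- 	for i in range(n + 1):
-- 		tab += [(n + 1)*[0]]
-- 	return tab
--
-- def TrianglePascalVierge(n):
-- 	tab = Triangle(n)
-- 	for i in range(len(tab)):
-- 			j = 0
-- 			while j <= i:
-- 				tab[i][j] = 1
-- 				j += 1
-- 	return tab
-- ===== SOURCE B (Python) =====
-- def TrianglePascalVierge(n):
--     return [(i + 1) * [1] + (n - i) * [0] for i in range(n + 1)]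
-- ===== Notes on version B (the rewrite author's own statement) =====
-- stated objective: simpler
-- what changed: Drops the Triangle pre-allocation helper and the fill loops entirely: each row is built directly as (i+1)*[1] + (n-i)*[0] in one comprehension instead of allocating an all-zero square matrix and overwriting the lower triangle with an inner while loop.
import Mathlib
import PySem

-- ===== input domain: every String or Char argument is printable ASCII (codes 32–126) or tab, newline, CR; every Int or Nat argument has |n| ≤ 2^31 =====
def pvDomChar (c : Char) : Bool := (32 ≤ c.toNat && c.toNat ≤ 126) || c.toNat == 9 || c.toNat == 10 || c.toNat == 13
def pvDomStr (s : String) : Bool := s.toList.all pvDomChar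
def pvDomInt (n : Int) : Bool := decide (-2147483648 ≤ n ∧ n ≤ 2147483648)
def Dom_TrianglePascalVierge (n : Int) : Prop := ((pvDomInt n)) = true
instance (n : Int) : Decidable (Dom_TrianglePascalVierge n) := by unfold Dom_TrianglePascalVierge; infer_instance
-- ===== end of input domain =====

-- B builds each row directly as (i+1) ones followed by (n-i) zeros, instead of A's
-- allocate-an-all-zero-square-then-overwrite-the-lower-triangle two-phase loop.

-- ===== PORT A =====
-- helper Triangle: tab = []; for i in range(n+1): tab += [(n+1)*[0]]
def TriangleA (n : Int) : List (List Int) :=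
  (PySem.List.pyRange 0 (n + 1) 1).foldl
    (fun tab _ => tab ++ [List.replicate (n + 1).toNat (0 : Int)]) []

-- inner 'while j <= i: tab[i][j] = 1; j += 1' acting on row tab[i]
def fillRowA (row : List Int) (i j : Nat) : List Int :=
  if j ≤ i then fillRowA (row.set j 1) i (j + 1) else row
termination_by i + 1 - j

def TrianglePascalVierge (n : Int) : List (List Int) :=
  let tab := TriangleA n
  (List.range tab.length).foldl
    (fun t i => t.set i (fillRowA (t.getD i []) i 0)) tab

-- ===== PORT B =====
def TrianglePascalVierge_alt (n : Int) : List (List Int) :=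
  (PySem.List.pyRange 0 (n + 1) 1).map
    (fun i => List.replicate (i + 1).toNat (1 : Int) ++ List.replicate (n - i).toNat (0 : Int))

-- ===== PRECONDITION & SPEC =====
def Spec_TrianglePascalVierge (n : Int) (out : List (List Int)) : Prop := out = TrianglePascalVierge_alt n
instance (n : Int) (out : List (List Int)) : Decidable (Spec_TrianglePascalVierge n out) := by unfold Spec_TrianglePascalVierge; infer_instance

-- ===== CLAIM (what is proved, stated in full; the proofs are below) =====
def Claim_equal_TrianglePascalVierge : Prop := ∀ (n : Int), Dom_TrianglePascalVierge n → Spec_TrianglePascalVierge n (TrianglePascalVierge n)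

-- ===== LEMMAS AND PROOFS =====

-- Triangle builds (n+1).toNat copies of the zero row.
lemma foldl_append_const {α β : Type} (c : α) :
    ∀ (l : List β) (acc : List α),
      l.foldl (fun tab _ => tab ++ [c]) acc = acc ++ List.replicate l.length c := by
  intro l
  induction l with
  | nil => intro acc; simp
  | cons x xs ih =>
      intro acc
      simp [List.foldl_cons, ih, List.replicate_succ]

lemma TriangleA_eq (n : Int) :
    TriangleA n = List.replicate (n + 1).toNat (List.replicate (n + 1).toNat (0 : Int)) := by
  unfold TriangleA
  rw [foldl_append_const]
  simp [PySem.List.length_pyRange_one]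

-- The outer fold only ever writes index i at step i, so later entries stay untouched.
lemma fold_pres {α : Type} (f : Nat → α → α) (z : α) (t : List α) :
    ∀ (m j : Nat), m ≤ j →
      ((List.range m).foldl (fun t i => t.set i (f i (t.getD i z))) t).getD j z = t.getD j z := by
  intro m
  induction m with
  | zero => intro j _; simp
  | succ m ih =>
      intro j hj
      rw [List.range_succ, List.foldl_append]
      simp only [List.foldl_cons, List.foldl_nil]
      rw [List.getD, List.getElem?_set_ne (by omega)]
      exact ih j (by omega)

-- Characterisation of the outer fold: index-wise application of f to the original entries.
lemma fold_main {α : Type} (f : Nat → α → α) (z : α) (t : List α) :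
    ∀ (m : Nat), m ≤ t.length →
      (List.range m).foldl (fun t i => t.set i (f i (t.getD i z))) t
        = (List.range m).map (fun i => f i (t.getD i z)) ++ t.drop m := by
  intro m
  induction m with
  | zero => intro _; simp
  | succ m ih =>
      intro hm
      rw [List.range_succ, List.foldl_append]
      simp only [List.foldl_cons, List.foldl_nil]
      rw [fold_pres f z t m m le_rfl, ih (by omega)]
      have hlen : ((List.range m).map (fun i => f i (t.getD i z))).length = m := by simp
      have hm' : m < t.length := by omega
      rw [List.set_append_right _ _ (by omega)]
      simp only [hlen, Nat.sub_self]
      rw [List.drop_eq_getElem_cons hm', List.set_cons_zero]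
      simp [List.getD, List.getElem?_eq_getElem hm']

-- The inner while loop turns j ones + m zeros into i+1 ones + the remaining zeros.
lemma fillRow_eq :
    ∀ (d i j m : Nat), d = i + 1 - j → j ≤ i + 1 → i < j + m →
      fillRowA (List.replicate j (1 : Int) ++ List.replicate m (0 : Int)) i j
        = List.replicate (i + 1) (1 : Int) ++ List.replicate (j + m - (i + 1)) (0 : Int) := by
  intro d
  induction d with
  | zero =>
      intro i j m hd hj _
      have hji : j = i + 1 := by omega
      rw [fillRowA]
      simp [hji]
  | succ d ih =>
      intro i j m hd hj hm
      have hji : j ≤ i := by omega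
      obtain ⟨m', rfl⟩ : ∃ m', m = m' + 1 := ⟨m - 1, by omega⟩
      rw [fillRowA]
      simp only [hji, if_pos]
      have hset : (List.replicate j (1 : Int) ++ List.replicate (m' + 1) (0 : Int)).set j 1
          = List.replicate (j + 1) (1 : Int) ++ List.replicate m' (0 : Int) := by
        rw [show List.replicate (m' + 1) (0 : Int) = 0 :: List.replicate m' 0 from rfl]
        rw [List.set_append_right _ _ (by simp)]
        simp only [List.length_replicate, Nat.sub_self, List.set_cons_zero]
        rw [List.replicate_succ']
        simp
      rw [hset, ih i (j + 1) m' (by omega) (by omega) (by omega)]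
      have h2 : j + 1 + m' - (i + 1) = j + (m' + 1) - (i + 1) := by omega
      rw [h2]

-- ===== VERDICT (by name: the statement is the Claim_ definition above) =====
theorem TrianglePascalVierge_spec : Claim_equal_TrianglePascalVierge := by
  intro n _
  unfold Spec_TrianglePascalVierge TrianglePascalVierge TrianglePascalVierge_alt
  rw [TriangleA_eq]
  rw [fold_main (fun i r => fillRowA r i 0) ([] : List Int) _ _ le_rfl]
  rw [List.drop_length, List.append_nil]
  rw [PySem.List.pyRange_one]
  simp only [sub_zero, List.length_replicate, List.map_map]
  apply List.map_congr_left
  intro i hi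
  rw [List.mem_range] at hi
  have hn : 0 ≤ n := by omega
  have hgd : (List.replicate (n + 1).toNat (List.replicate (n + 1).toNat (0 : Int))).getD i []
      = List.replicate (n + 1).toNat (0 : Int) := by
    simp [List.getD, hi]
  simp only [Function.comp, hgd]
  have := fillRow_eq (i + 1) i 0 (n + 1).toNat rfl (by omega) (by omega)
  simp only [List.replicate_zero, List.nil_append, Nat.zero_add] at this
  rw [this]
  have h1 : ((0 : Int) + i + 1).toNat = i + 1 := by omega
  have h2 : (n - (0 + (i : Int))).toNat = (n + 1).toNat - (i + 1) := by omega
  rw [h1, h2]
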